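-- pv_equiv track=rewrite | github.com/svetlogor/tetrika_1 | tetrika_1.py | abc_summ_in_name
-- ===== SOURCE A (Python) =====
-- import string
--
-- def abc_create_dict():
--     """
--     Создание словаря и нумерацию каждой буквы в словаре.
--     :return: Словарь (dict) {'буква': номер буквы в словаре}. Пример {'A': 1, 'B': 2, ... {n}: n}
--     """
--     letters = string.ascii_uppercase
--     ABC_dict = {}
--     for i in range(26):
--         ABC_dict.update({ letters[i] : i+1 })
--     return ABC_dict
--
-- def abc_summ_in_name(list_names):
--     """
--     Расчет суммы порядковых номеров букв.
--     :param list_names: Список имен (list)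
--     :return: Словарь (dict) {'имя': сумма}. Пример {'ABE': 8, 'ABEL': 20, ... }
--     """
--     ABC_summ = {}
--     dict_ABC = abc_create_dict()
--     for name in list_names:
--         summ_letters = 0
--         for letter in name:
--             for key, value in dict_ABC.items():
--                 if key == letter:
--                     summ_letters += value
--         ABC_summ.update({name : summ_letters})
--     return ABC_summ
-- ===== SOURCE B (Python) =====
-- def abc_summ_in_name(list_names):
--     result = {}
--     for name in list_names:
--         total = 0
--         for c in name:
--             if 'A' <= c <= 'Z':
--                 total += ord(c) - 64
--         result[name] = total
--     return result
-- ===== Notes on version B (the rewrite author's own statement) =====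
-- stated objective: simpler
-- what changed: Drops the precomputed letter->index dict and its per-character linear scan; the per-letter value is computed directly as ord(c)-64 guarded by 'A'<=c<='Z'.
import Mathlib
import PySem

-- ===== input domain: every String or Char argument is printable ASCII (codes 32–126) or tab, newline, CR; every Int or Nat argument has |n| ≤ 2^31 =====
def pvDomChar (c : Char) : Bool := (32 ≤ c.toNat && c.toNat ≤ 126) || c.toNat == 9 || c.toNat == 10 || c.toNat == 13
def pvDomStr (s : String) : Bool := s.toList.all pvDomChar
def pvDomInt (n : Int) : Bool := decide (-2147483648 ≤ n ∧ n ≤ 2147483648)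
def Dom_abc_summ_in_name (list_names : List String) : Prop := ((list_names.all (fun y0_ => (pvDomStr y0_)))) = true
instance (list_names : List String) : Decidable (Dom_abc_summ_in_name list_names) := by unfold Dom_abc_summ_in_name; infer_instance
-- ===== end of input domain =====

-- ===== PORT A =====
-- B drops A's 26-entry letter table and per-character table scan in favour of direct ord arithmetic (simpler).
-- string.ascii_uppercase
def pvLetters : List Char := "ABCDEFGHIJKLMNOPQRSTUVWXYZ".toList

def abc_create_dict : PySem.Dict Char Int :=
  (PySem.List.pyRange 0 26 1).foldl (fun d i =>
    -- letters[i]: i ranges over 0..25, always in range, so pyGet? is always some (none branch unreachable)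
    match PySem.List.pyGet? pvLetters i with
    | some c => d.insert c (i + 1)
    | none => d) PySem.Dict.empty

def abc_summ_in_name (list_names : List String) : List (String × Int) :=
  let dict_ABC := abc_create_dict
  (list_names.foldl (fun ABC_summ name =>
    let summ_letters : Int :=
      name.toList.foldl (fun s letter =>
        dict_ABC.items.foldl (fun s2 kv => if kv.1 == letter then s2 + kv.2 else s2) s) 0
    ABC_summ.insert name summ_letters) (PySem.Dict.empty : PySem.Dict String Int)).items

-- ===== PORT B =====
def abc_summ_in_name_alt (list_names : List String) : List (String × Int) :=
  (list_names.foldl (fun result name =>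
    result.insert name
      (name.toList.foldl (fun total c =>
        if 'A' ≤ c ∧ c ≤ 'Z' then total + ((c.toNat : Int) - 64) else total) 0))
    (PySem.Dict.empty : PySem.Dict String Int)).items

-- ===== PRECONDITION & SPEC =====
def Spec_abc_summ_in_name (list_names : List String) (out : List (String × Int)) : Prop := out = abc_summ_in_name_alt list_names
instance (list_names : List String) (out : List (String × Int)) : Decidable (Spec_abc_summ_in_name list_names out) := by unfold Spec_abc_summ_in_name; infer_instance

-- ===== CLAIM (what is proved, stated in full; the proofs are below) =====
def Claim_equal_abc_summ_in_name : Prop := ∀ (list_names : List String), Dom_abc_summ_in_name list_names → Spec_abc_summ_in_name list_names (abc_summ_in_name list_names)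

-- ===== LEMMAS AND PROOFS =====
-- A's per-letter contribution: one scan of the 26-entry table
def pvInner (c : Char) : Int :=
  abc_create_dict.items.foldl (fun s2 kv => if kv.1 == c then s2 + kv.2 else s2) 0

lemma pvChar_eq_of_toNat_eq {c d : Char} (h : c.toNat = d.toNat) : c = d :=
  Char.ext (UInt32.toNat_inj.mp h)

lemma pvItems_eq : abc_create_dict.items = [(('A' : Char), (1 : Int)), (('B' : Char), (2 : Int)), (('C' : Char), (3 : Int)), (('D' : Char), (4 : Int)), (('E' : Char), (5 : Int)), (('F' : Char), (6 : Int)), (('G' : Char), (7 : Int)), (('H' : Char), (8 : Int)), (('I' : Char), (9 : Int)), (('J' : Char), (10 : Int)), (('K' : Char), (11 : Int)), (('L' : Char), (12 : Int)), (('M' : Char), (13 : Int)), (('N' : Char), (14 : Int)), (('O' : Char), (15 : Int)), (('P' : Char), (16 : Int)), (('Q' : Char), (17 : Int)), (('R' : Char), (18 : Int)), (('S' : Char), (19 : Int)), (('T' : Char), (20 : Int)), (('U' : Char), (21 : Int)), (('V' : Char), (22 : Int)), (('W' : Char), (23 : Int)), (('X' : Char), (24 : Int)), (('Y' : Char), (25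 : Int)), (('Z' : Char), (26 : Int))] := by decide

lemma pvInner_eq (c : Char) :
    pvInner c = (if 'A' ≤ c ∧ c ≤ 'Z' then ((c.toNat : Int) - 64) else 0) := by
  by_cases h0 : c = 'A'
  · subst h0; decide
  by_cases h1 : c = 'B'
  · subst h1; decide
  by_cases h2 : c = 'C'
  · subst h2; decide
  by_cases h3 : c = 'D'
  · subst h3; decide
  by_cases h4 : c = 'E'
  · subst h4; decide
  by_cases h5 : c = 'F'
  · subst h5; decide
  by_cases h6 : c = 'G'
  · subst h6; decide
  by_cases h7 : c = 'H'
  · subst h7; decide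
  by_cases h8 : c = 'I'
  · subst h8; decide
  by_cases h9 : c = 'J'
  · subst h9; decide
  by_cases h10 : c = 'K'
  · subst h10; decide
  by_cases h11 : c = 'L'
  · subst h11; decide
  by_cases h12 : c = 'M'
  · subst h12; decide
  by_cases h13 : c = 'N'
  · subst h13; decide
  by_cases h14 : c = 'O'
  · subst h14; decide
  by_cases h15 : c = 'P'
  · subst h15; decide
  by_cases h16 : c = 'Q'
  · subst h16; decide
  by_cases h17 : c = 'R'
  · subst h17; decide
  by_cases h18 : c = 'S'
  · subst h18; decide
  by_cases h19 : c = 'T'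
  · subst h19; decide
  by_cases h20 : c = 'U'
  · subst h20; decide
  by_cases h21 : c = 'V'
  · subst h21; decide
  by_cases h22 : c = 'W'
  · subst h22; decide
  by_cases h23 : c = 'X'
  · subst h23; decide
  by_cases h24 : c = 'Y'
  · subst h24; decide
  by_cases h25 : c = 'Z'
  · subst h25; decide
  have ne0 : 'A' ≠ c := fun h => h0 h.symm
  have ne1 : 'B' ≠ c := fun h => h1 h.symm
  have ne2 : 'C' ≠ c := fun h => h2 h.symm
  have ne3 : 'D' ≠ c := fun h => h3 h.symm
  have ne4 : 'E' ≠ c := fun h => h4 h.symm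
  have ne5 : 'F' ≠ c := fun h => h5 h.symm
  have ne6 : 'G' ≠ c := fun h => h6 h.symm
  have ne7 : 'H' ≠ c := fun h => h7 h.symm
  have ne8 : 'I' ≠ c := fun h => h8 h.symm
  have ne9 : 'J' ≠ c := fun h => h9 h.symm
  have ne10 : 'K' ≠ c := fun h => h10 h.symm
  have ne11 : 'L' ≠ c := fun h => h11 h.symm
  have ne12 : 'M' ≠ c := fun h => h12 h.symm
  have ne13 : 'N' ≠ c := fun h => h13 h.symm
  have ne14 : 'O' ≠ c := fun h => h14 h.symm
  have ne15 : 'P' ≠ c := fun h => h15 h.symm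
  have ne16 : 'Q' ≠ c := fun h => h16 h.symm
  have ne17 : 'R' ≠ c := fun h => h17 h.symm
  have ne18 : 'S' ≠ c := fun h => h18 h.symm
  have ne19 : 'T' ≠ c := fun h => h19 h.symm
  have ne20 : 'U' ≠ c := fun h => h20 h.symm
  have ne21 : 'V' ≠ c := fun h => h21 h.symm
  have ne22 : 'W' ≠ c := fun h => h22 h.symm
  have ne23 : 'X' ≠ c := fun h => h23 h.symm
  have ne24 : 'Y' ≠ c := fun h => h24 h.symm
  have ne25 : 'Z' ≠ c := fun h => h25 h.symm
  have hrange : ¬ ('A' ≤ c ∧ c ≤ 'Z') := by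
    rintro ⟨hl, hr⟩
    have hl' : 65 ≤ c.toNat := hl
    have hr' : c.toNat ≤ 90 := hr
    have n0 : c.toNat ≠ 65 := fun h => h0 (pvChar_eq_of_toNat_eq h)
    have n1 : c.toNat ≠ 66 := fun h => h1 (pvChar_eq_of_toNat_eq h)
    have n2 : c.toNat ≠ 67 := fun h => h2 (pvChar_eq_of_toNat_eq h)
    have n3 : c.toNat ≠ 68 := fun h => h3 (pvChar_eq_of_toNat_eq h)
    have n4 : c.toNat ≠ 69 := fun h => h4 (pvChar_eq_of_toNat_eq h)
    have n5 : c.toNat ≠ 70 := fun h => h5 (pvChar_eq_of_toNat_eq h)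
    have n6 : c.toNat ≠ 71 := fun h => h6 (pvChar_eq_of_toNat_eq h)
    have n7 : c.toNat ≠ 72 := fun h => h7 (pvChar_eq_of_toNat_eq h)
    have n8 : c.toNat ≠ 73 := fun h => h8 (pvChar_eq_of_toNat_eq h)
    have n9 : c.toNat ≠ 74 := fun h => h9 (pvChar_eq_of_toNat_eq h)
    have n10 : c.toNat ≠ 75 := fun h => h10 (pvChar_eq_of_toNat_eq h)
    have n11 : c.toNat ≠ 76 := fun h => h11 (pvChar_eq_of_toNat_eq h)
    have n12 : c.toNat ≠ 77 := fun h => h12 (pvChar_eq_of_toNat_eq h)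
    have n13 : c.toNat ≠ 78 := fun h => h13 (pvChar_eq_of_toNat_eq h)
    have n14 : c.toNat ≠ 79 := fun h => h14 (pvChar_eq_of_toNat_eq h)
    have n15 : c.toNat ≠ 80 := fun h => h15 (pvChar_eq_of_toNat_eq h)
    have n16 : c.toNat ≠ 81 := fun h => h16 (pvChar_eq_of_toNat_eq h)
    have n17 : c.toNat ≠ 82 := fun h => h17 (pvChar_eq_of_toNat_eq h)
    have n18 : c.toNat ≠ 83 := fun h => h18 (pvChar_eq_of_toNat_eq h)
    have n19 : c.toNat ≠ 84 := fun h => h19 (pvChar_eq_of_toNat_eq h)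
    have n20 : c.toNat ≠ 85 := fun h => h20 (pvChar_eq_of_toNat_eq h)
    have n21 : c.toNat ≠ 86 := fun h => h21 (pvChar_eq_of_toNat_eq h)
    have n22 : c.toNat ≠ 87 := fun h => h22 (pvChar_eq_of_toNat_eq h)
    have n23 : c.toNat ≠ 88 := fun h => h23 (pvChar_eq_of_toNat_eq h)
    have n24 : c.toNat ≠ 89 := fun h => h24 (pvChar_eq_of_toNat_eq h)
    have n25 : c.toNat ≠ 90 := fun h => h25 (pvChar_eq_of_toNat_eq h)
    omega
  simp [pvInner, pvItems_eq, List.foldl, ne0,ne1,ne2,ne3,ne4,ne5,ne6,ne7,ne8,ne9,ne10,ne11,ne12,ne13,ne14,ne15,ne16,ne17,ne18,ne19,ne20,ne21,ne22,ne23,ne24,ne25, hrange]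

lemma pvInner_shift (c : Char) (s : Int) :
    abc_create_dict.items.foldl (fun s2 kv => if kv.1 == c then s2 + kv.2 else s2) s
      = s + pvInner c := by
  have key : ∀ (L : List (Char × Int)) (a b : Int),
      L.foldl (fun s2 kv => if kv.1 == c then s2 + kv.2 else s2) (a + b)
        = a + L.foldl (fun s2 kv => if kv.1 == c then s2 + kv.2 else s2) b := by
    intro L
    induction L with
    | nil => intro a b; rfl
    | cons kv rest ih =>
      intro a b
      simp only [List.foldl]
      by_cases h : (kv.1 == c) = true
      · rw [if_pos h, if_pos h, add_assoc]; exact ih a (b + kv.2)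
      · rw [if_neg h, if_neg h]; exact ih a b
  have := key abc_create_dict.items s 0
  simpa [pvInner] using this

lemma pvSum_eq (name : String) :
    (name.toList.foldl (fun s letter =>
        abc_create_dict.items.foldl (fun s2 kv => if kv.1 == letter then s2 + kv.2 else s2) s) 0)
      = name.toList.foldl (fun total c =>
          if 'A' ≤ c ∧ c ≤ 'Z' then total + ((c.toNat : Int) - 64) else total) 0 := by
  have key : ∀ (cs : List Char) (s : Int),
      cs.foldl (fun s letter =>
        abc_create_dict.items.foldl (fun s2 kv => if kv.1 == letter then s2 + kv.2 else s2) s) s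
      = cs.foldl (fun total c =>
          if 'A' ≤ c ∧ c ≤ 'Z' then total + ((c.toNat : Int) - 64) else total) s := by
    intro cs
    induction cs with
    | nil => intro s; rfl
    | cons c rest ih =>
      intro s
      simp only [List.foldl]
      rw [pvInner_shift, pvInner_eq, ih]
      by_cases h : 'A' ≤ c ∧ c ≤ 'Z'
      · simp [h]
      · simp [h]
  exact key name.toList 0

-- ===== VERDICT (by name: the statement is the Claim_ definition above) =====
theorem abc_summ_in_name_spec : Claim_equal_abc_summ_in_name := by
  intro list_names _
  unfold Spec_abc_summ_in_name abc_summ_in_name abc_summ_in_name_alt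
  induction list_names using List.reverseRecOn with
  | nil => rfl
  | append_singleton rest name ih =>
    simp only [List.foldl_append, List.foldl_cons, List.foldl_nil, pvSum_eq]
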